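-- pv_equiv track=rewrite | github.com/FilippoAleotti/SIMUR | solutions/exercise4.py | frequency_extractor
-- ===== SOURCE A (Python) =====
-- def frequency_extractor(input_list):
--     output_dict = {}
--     for element in input_list:
--         if str(element) not in output_dict.keys():
--             output_dict[str(element)] = 1
--         else:
--             output_dict[str(element)] += 1
--     min_value = None
--     #NOTE: val are str, so we need an int cast to obtain integer values
--     for val, freq in output_dict.items():
--         if min_value == None:
--             #NOTE: at first iteration, we will always enter here
--             min_value = int(val)
--         else:
--             if freq < output_dict[str(min_value)]:
--                 # this frequency value is lower than the frequency of the current minimum,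
--                 # so we have to update the current minimum
--                 min_value = int(val)
--             elif freq ==  output_dict[str(min_value)] and min_value > int(val):
--                 # the frequency is equal to the frequency of minimum.
--                 # We have to update the minimum only if the current minimum
--                 # is greather than this value
--                 min_value = int(val)
--     output_dict['min'] = min_value
--     return output_dict
-- ===== SOURCE B (Python) =====
-- def frequency_extractor(input_list):
--     output_dict = {}
--     for element in input_list:
--         key = str(element)
--         output_dict[key] = output_dict.get(key, 0) + 1
--     ranked = sorted(output_dict.items(), key=lambda kv: (kv[1], int(kv[0])))
--     output_dict['min'] = int(ranked[0][0]) if ranked else None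
--     return output_dict
-- ===== Notes on version B (the rewrite author's own statement) =====
-- stated objective: simpler
-- what changed: A's manual min-scan over the items with explicit tie-breaking and dict re-lookups (output_dict[str(min_value)]) is replaced by building the counter with dict.get and taking the first item of the items sorted once on the key (count, int(key)).
-- outside the precondition, e.g. on frequency_extractor([]): A returns {'min': None}, B returns {'min': None}
import Mathlib
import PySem

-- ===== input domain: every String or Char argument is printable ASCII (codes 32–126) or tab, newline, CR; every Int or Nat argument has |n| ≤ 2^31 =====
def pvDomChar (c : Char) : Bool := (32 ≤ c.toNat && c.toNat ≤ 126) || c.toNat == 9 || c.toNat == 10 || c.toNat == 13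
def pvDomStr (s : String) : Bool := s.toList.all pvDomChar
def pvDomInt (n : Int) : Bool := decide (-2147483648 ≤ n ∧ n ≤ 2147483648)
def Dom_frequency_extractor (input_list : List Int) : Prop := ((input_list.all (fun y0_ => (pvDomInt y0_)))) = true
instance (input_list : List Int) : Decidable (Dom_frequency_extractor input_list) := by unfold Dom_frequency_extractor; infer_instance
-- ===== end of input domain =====

-- B replaces A's manual min-scan (with its dict re-lookups) by sorting the counter's
-- items once on the key (count, int(key)) and taking the first item; objective: simpler.

-- ===== PORT A =====
-- int(val) is ported as (PySem.Int.ofStr? val).getD 0: keys of output_dict are str(int)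
-- outputs, on which ofStr? is always `some`, so the default is never taken.
-- output_dict[str(min_value)] is ported as getD _ 0: under Pre_ the key str(min_value)
-- is always present (str/int round-trip), so no KeyError and the default is never taken.
def frequency_extractor (input_list : List Int) : List (String × Int) :=
  let d := input_list.foldl (fun d e =>
    if d.contains (PySem.Int.toStr e) = false then
      d.insert (PySem.Int.toStr e) 1
    else
      d.insert (PySem.Int.toStr e) (d.getD (PySem.Int.toStr e) 0 + 1)) (PySem.Dict.empty : PySem.Dict String Int)
  let mv := d.items.foldl (fun (mv : Option Int) kv =>
    match mv with
    | none => some ((PySem.Int.ofStr? kv.1).getD 0)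
    | some m =>
      if kv.2 < d.getD (PySem.Int.toStr m) 0 then
        some ((PySem.Int.ofStr? kv.1).getD 0)
      else if kv.2 = d.getD (PySem.Int.toStr m) 0 ∧ m > (PySem.Int.ofStr? kv.1).getD 0 then
        some ((PySem.Int.ofStr? kv.1).getD 0)
      else mv) none
  -- Python stores None on the empty input; that case is outside Pre_ (None is no Int)
  (d.insert "min" (mv.getD 0)).items

-- ===== PORT B =====
-- int(kv[0]) is ported as (PySem.Int.ofStr? kv.1).getD 0 (always `some` here, as above)
def frequency_extractor_alt (input_list : List Int) : List (String × Int) :=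
  let d := input_list.foldl (fun d e =>
    d.insert (PySem.Int.toStr e) (d.getD (PySem.Int.toStr e) 0 + 1)) (PySem.Dict.empty : PySem.Dict String Int)
  let ranked := PySem.List.sorted2 d.items (fun kv => kv.2) (fun kv => (PySem.Int.ofStr? kv.1).getD 0)
  let mv : Option Int := match ranked with
    | [] => none                                  -- Python: None; outside Pre_
    | kv :: _ => some ((PySem.Int.ofStr? kv.1).getD 0)
  (d.insert "min" (mv.getD 0)).items

-- ===== PRECONDITION & SPEC =====
-- Pre_ excludes the empty list, on which A returns {'min': None} — None is not a value of
-- the declared Int type.  The second conjunct (str/int round-trip) is TRUE of every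
-- integer, so it excludes no input at all; it is carried as an explicit hypothesis only
-- because PySem exposes no round-trip lemma for ofStr?/toStr.
def Pre_frequency_extractor (input_list : List Int) : Prop :=
  input_list ≠ [] ∧ ∀ x ∈ input_list, PySem.Int.ofStr? (PySem.Int.toStr x) = some x
instance (input_list : List Int) : Decidable (Pre_frequency_extractor input_list) := by
  unfold Pre_frequency_extractor; infer_instance
def pvWitness_frequency_extractor : List Int := [2, -3, -3]

def Spec_frequency_extractor (input_list : List Int) (out : List (String × Int)) : Prop := out = frequency_extractor_alt input_list
instance (input_list : List Int) (out : List (String × Int)) : Decidable (Spec_frequency_extractor input_list out) := by unfold Spec_frequency_extractor; infer_instance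

-- ===== CLAIM (what is proved, stated in full; the proofs are below) =====
def Claim_equal_frequency_extractor : Prop := ∀ (input_list : List Int), Dom_frequency_extractor input_list → Pre_frequency_extractor input_list → Spec_frequency_extractor input_list (frequency_extractor input_list)

-- ===== LEMMAS AND PROOFS =====

def feBuild (l : List Int) : PySem.Dict String Int :=
  l.foldl (fun d e => d.insert (PySem.Int.toStr e) (d.getD (PySem.Int.toStr e) 0 + 1)) (PySem.Dict.empty : PySem.Dict String Int)

lemma feBuild_eq_portA (l : List Int) :
    (l.foldl (fun d e =>
      if d.contains (PySem.Int.toStr e) = false then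
        d.insert (PySem.Int.toStr e) 1
      else
        d.insert (PySem.Int.toStr e) (d.getD (PySem.Int.toStr e) 0 + 1)) (PySem.Dict.empty : PySem.Dict String Int))
    = feBuild l := by
  unfold feBuild
  apply PySem.List.foldl_congr_mem
  intro d e _
  by_cases h : d.contains (PySem.Int.toStr e)
  · simp [h]
  · simp only [Bool.not_eq_true] at h
    simp only [h, if_true]
    rw [PySem.Dict.getD_of_not_contains d 0 h]
    norm_num

lemma feBuild_nodup (l : List Int) : (feBuild l).keys.Nodup := by
  unfold feBuild
  exact PySem.Dict.nodup_keys_foldl_insert_key l PySem.Int.toStr _ _ PySem.Dict.nodup_keys_empty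

lemma feBuild_mem_keys (l : List Int) (k : String) :
    k ∈ (feBuild l).keys ↔ k ∈ l.map PySem.Int.toStr := by
  unfold feBuild
  rw [PySem.Dict.keys_foldl_insert_key]
  simp [PySem.Set.mem_update, PySem.Dict.keys_empty]

def feInt (k : String) : Int := (PySem.Int.ofStr? k).getD 0

def feBefore (p q : String × Int) : Bool :=
  decide (p.2 < q.2) || (!decide (q.2 < p.2) && decide (feInt p.1 < feInt q.1))

def feHeadFold (acc : Option (String × Int)) (xs : List (String × Int)) : Option (String × Int) :=
  xs.foldl (fun m x => match m with | none => some x | some h => some (if feBefore x h then x else h)) acc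

lemma insertBy_head? (before : (String × Int) → (String × Int) → Bool) (x : String × Int)
    (ys : List (String × Int)) :
    (PySem.List.insertBy before x ys).head? =
      some (match ys with | [] => x | h :: _ => if before x h then x else h) := by
  cases ys with
  | nil => rfl
  | cons h t =>
    show (if before x h then x :: h :: t else h :: PySem.List.insertBy before x t).head? = _
    by_cases hb : before x h <;> simp [hb]

lemma foldl_insertBy_head? (xs : List (String × Int)) (acc : List (String × Int)) :
    (xs.foldl (fun acc x => PySem.List.insertBy feBefore x acc) acc).head? =
      feHeadFold acc.head? xs := by
  induction xs generalizing acc with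
  | nil => rfl
  | cons x t ih =>
    rw [List.foldl_cons, ih, insertBy_head?]
    unfold feHeadFold
    rw [List.foldl_cons]
    cases acc <;> simp

lemma hb_iff (p q : String × Int) :
    (feBefore p q = false → ¬ p.2 < q.2 ∧ ¬ (p.2 = q.2 ∧ feInt q.1 > feInt p.1)) ∧
    (feBefore p q = true → p.2 < q.2 ∨ (¬ q.2 < p.2 ∧ feInt p.1 < feInt q.1)) := by
  unfold feBefore
  by_cases a : p.2 < q.2 <;> by_cases b : q.2 < p.2 <;> by_cases c : feInt p.1 < feInt q.1 <;>
    simp [a, b, c] <;> omega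

lemma scan_eq_headFold (d : PySem.Dict String Int) (ps : List (String × Int))
    (hps : ∀ p ∈ ps, PySem.Int.toStr (feInt p.1) = p.1 ∧ d.getD p.1 0 = p.2)
    (accA : Option Int) (accM : Option (String × Int))
    (hrel : (accA = none ∧ accM = none) ∨
      ∃ q, accM = some q ∧ accA = some (feInt q.1) ∧
        PySem.Int.toStr (feInt q.1) = q.1 ∧ d.getD q.1 0 = q.2) :
    (ps.foldl (fun (mv : Option Int) kv =>
      match mv with
      | none => some ((PySem.Int.ofStr? kv.1).getD 0)
      | some m =>
        if kv.2 < d.getD (PySem.Int.toStr m) 0 then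
          some ((PySem.Int.ofStr? kv.1).getD 0)
        else if kv.2 = d.getD (PySem.Int.toStr m) 0 ∧ m > (PySem.Int.ofStr? kv.1).getD 0 then
          some ((PySem.Int.ofStr? kv.1).getD 0)
        else mv) accA)
    = (feHeadFold accM ps).map (fun q => feInt q.1) := by
  induction ps generalizing accA accM with
  | nil =>
    rcases hrel with ⟨hA, hM⟩ | ⟨q, hM, hA, _⟩ <;> simp [feHeadFold, hA, hM]
  | cons p t ih =>
    obtain ⟨hp1, hp2⟩ := hps p (List.mem_cons_self ..)
    have hps' : ∀ r ∈ t, PySem.Int.toStr (feInt r.1) = r.1 ∧ d.getD r.1 0 = r.2 :=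
      fun r hr => hps r (List.mem_cons_of_mem _ hr)
    rw [List.foldl_cons]
    rcases hrel with ⟨hA, hM⟩ | ⟨q, hM, hA, hq1, hq2⟩
    · subst hA; subst hM
      have hHF : feHeadFold none (p :: t) = feHeadFold (some p) t := rfl
      rw [hHF]
      exact ih hps' _ _ (Or.inr ⟨p, rfl, rfl, hp1, hp2⟩)
    · subst hA; subst hM
      have hHF : feHeadFold (some q) (p :: t) =
          feHeadFold (some (if feBefore p q then p else q)) t := rfl
      rw [hHF]
      show List.foldl _ (if p.2 < d.getD (PySem.Int.toStr (feInt q.1)) 0 then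
          some ((PySem.Int.ofStr? p.1).getD 0)
        else if p.2 = d.getD (PySem.Int.toStr (feInt q.1)) 0 ∧ feInt q.1 > (PySem.Int.ofStr? p.1).getD 0 then
          some ((PySem.Int.ofStr? p.1).getD 0)
        else some (feInt q.1)) t = _
      have hfeInt : (PySem.Int.ofStr? p.1).getD 0 = feInt p.1 := rfl
      rw [hq1, hq2, hfeInt]
      have hbfacts := hb_iff p q
      rcases hb : feBefore p q with _ | _
      · rw [if_neg (hbfacts.1 hb).1, if_neg (hbfacts.1 hb).2]
        exact ih hps' _ _ (Or.inr ⟨q, rfl, rfl, hq1, hq2⟩)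
      · rcases hbfacts.2 hb with hlt | ⟨hnl, hl2⟩
        · rw [if_pos hlt]
          exact ih hps' _ _ (Or.inr ⟨p, rfl, rfl, hp1, hp2⟩)
        · by_cases c1 : p.2 < q.2
          · rw [if_pos c1]
            exact ih hps' _ _ (Or.inr ⟨p, rfl, rfl, hp1, hp2⟩)
          · rw [if_neg c1, if_pos ⟨by omega, hl2⟩]
            exact ih hps' _ _ (Or.inr ⟨p, rfl, rfl, hp1, hp2⟩)

-- every item of the counting dict round-trips through int() and reports its own count
lemma feBuild_items (l : List Int)
    (hr : ∀ x ∈ l, PySem.Int.ofStr? (PySem.Int.toStr x) = some x) :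
    ∀ p ∈ (feBuild l).items,
      PySem.Int.toStr (feInt p.1) = p.1 ∧ (feBuild l).getD p.1 0 = p.2 := by
  intro p hp
  have hk : p.1 ∈ (feBuild l).keys := PySem.Dict.mem_keys_of_mem_items _ hp
  rw [feBuild_mem_keys] at hk
  obtain ⟨x, hx, hkx⟩ := List.mem_map.mp hk
  constructor
  · rw [← hkx]
    unfold feInt
    rw [hr x hx]
    rfl
  · exact PySem.Dict.getD_of_mem_items _ hp (feBuild_nodup l) 0

-- ===== VERDICT (by name: the statement is the Claim_ definition above) =====
theorem frequency_extractor_spec : Claim_equal_frequency_extractor := by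
  intro l _ hPre
  obtain ⟨hne, hr⟩ := hPre
  unfold Spec_frequency_extractor frequency_extractor frequency_extractor_alt
  dsimp only
  rw [feBuild_eq_portA]
  rw [show (List.foldl (fun (d : PySem.Dict String Int) e =>
      d.insert (PySem.Int.toStr e) (d.getD (PySem.Int.toStr e) 0 + 1)) PySem.Dict.empty l)
    = feBuild l from rfl]
  have hA : ((feBuild l).items.foldl (fun (mv : Option Int) kv =>
      match mv with
      | none => some ((PySem.Int.ofStr? kv.1).getD 0)
      | some m =>
        if kv.2 < (feBuild l).getD (PySem.Int.toStr m) 0 then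
          some ((PySem.Int.ofStr? kv.1).getD 0)
        else if kv.2 = (feBuild l).getD (PySem.Int.toStr m) 0 ∧ m > (PySem.Int.ofStr? kv.1).getD 0 then
          some ((PySem.Int.ofStr? kv.1).getD 0)
        else mv) none)
      = (feHeadFold none (feBuild l).items).map (fun q => feInt q.1) :=
    scan_eq_headFold (feBuild l) (feBuild l).items (feBuild_items l hr) none none
      (Or.inl ⟨rfl, rfl⟩)
  have hB : PySem.List.sorted2 (feBuild l).items (fun kv => kv.2)
        (fun kv => (PySem.Int.ofStr? kv.1).getD 0)
      = (feBuild l).items.foldl (fun acc x => PySem.List.insertBy feBefore x acc) [] := rfl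
  have hHead : (PySem.List.sorted2 (feBuild l).items (fun kv => kv.2)
        (fun kv => (PySem.Int.ofStr? kv.1).getD 0)).head?
      = feHeadFold none (feBuild l).items := by
    rw [hB, foldl_insertBy_head?]
    rfl
  have hmv : (match PySem.List.sorted2 (feBuild l).items (fun kv => kv.2)
        (fun kv => (PySem.Int.ofStr? kv.1).getD 0) with
      | [] => (none : Option Int)
      | kv :: _ => some ((PySem.Int.ofStr? kv.1).getD 0))
      = (feHeadFold none (feBuild l).items).map (fun q => feInt q.1) := by
    rw [← hHead]
    cases PySem.List.sorted2 (feBuild l).items (fun kv => kv.2)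
        (fun kv => (PySem.Int.ofStr? kv.1).getD 0) <;> rfl
  rw [hA, hmv]
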